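-- pv_equiv track=rewrite | github.com/skoruppa/plugin.video.docchipl | resources/lib/players/lycoris.py | get_highest_quality
-- ===== SOURCE A (Python) =====
-- def get_highest_quality(video_links):
--     quality_map = {
--         "SD": 480,
--         "HD": 720,
--         "FHD": 1080
--     }
--
--     filtered_links = {k: v for k, v in video_links.items() if k in quality_map}
--
--     if not filtered_links:
--         return None, None, None
--
--     highest_quality = max(filtered_links.keys(), key=lambda q: quality_map.get(q, 0))
--     highest_resolution = f"{quality_map[highest_quality]}p"
--
--     return filtered_links[highest_quality], highest_resolution, None
-- ===== SOURCE B (Python) =====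
-- def get_highest_quality(video_links):
--     quality_map = {
--         "SD": 480,
--         "HD": 720,
--         "FHD": 1080
--     }
--
--     for q in ("FHD", "HD", "SD"):
--         if q in video_links:
--             return video_links[q], f"{quality_map[q]}p", None
--     return None, None, None
-- ===== Notes on version B (the rewrite author's own statement) =====
-- stated objective: simpler
-- what changed: B drops the filtered-dict construction and the max-by-resolution pass: it scans the three quality tiers from highest to lowest and returns the first one present in the dict (short-circuiting), with no intermediate dict and no running max.
import Mathlib
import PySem

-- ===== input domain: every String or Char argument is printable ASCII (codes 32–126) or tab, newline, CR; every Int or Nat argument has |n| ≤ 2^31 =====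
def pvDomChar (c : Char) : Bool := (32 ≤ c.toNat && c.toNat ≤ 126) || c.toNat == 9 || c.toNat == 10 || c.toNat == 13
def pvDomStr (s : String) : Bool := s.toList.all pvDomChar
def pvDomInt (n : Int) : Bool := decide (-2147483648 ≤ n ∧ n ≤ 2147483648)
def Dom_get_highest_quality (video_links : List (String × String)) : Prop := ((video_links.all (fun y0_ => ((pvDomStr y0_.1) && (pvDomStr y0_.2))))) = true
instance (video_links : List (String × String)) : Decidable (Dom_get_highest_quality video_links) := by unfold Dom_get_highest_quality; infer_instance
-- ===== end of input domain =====

-- B replaces the filtered-dict + max-by-resolution pass by a short-circuiting scan of the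
-- three quality tiers from highest to lowest (objective: simpler).

-- ===== PORT A =====
-- quality_map = {"SD": 480, "HD": 720, "FHD": 1080}
def pvQualityMapA : PySem.Dict String Int :=
  PySem.Dict.mk [("SD", 480), ("HD", 720), ("FHD", 1080)]

def get_highest_quality (video_links : List (String × String)) : Option String × Option String × Option String :=
  -- filtered_links = {k: v for k, v in video_links.items() if k in quality_map}
  let filtered : PySem.Dict String String :=
    video_links.foldl (fun d p => if pvQualityMapA.contains p.1 then d.insert p.1 p.2 else d)
      PySem.Dict.empty
  -- if not filtered_links: return None, None, None
  if filtered.items.isEmpty then (none, none, none)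
  else
    -- highest_quality = max(filtered_links.keys(), key=lambda q: quality_map.get(q, 0))
    match PySem.List.max? filtered.keys (fun q => pvQualityMapA.getD q 0) with
    | none => (none, none, none)  -- unreachable: keys of a nonempty dict are nonempty
    | some hq =>
      -- quality_map[highest_quality] is present (hq came from the filtered keys), so getD is exact
      (filtered.get? hq, some (PySem.Int.toStr (pvQualityMapA.getD hq 0) ++ "p"), none)

-- ===== PORT B =====
def pvQualityMapB : PySem.Dict String Int :=
  PySem.Dict.mk [("SD", 480), ("HD", 720), ("FHD", 1080)]

-- for q in ("FHD", "HD", "SD"): if q in video_links: return video_links[q], f"{quality_map[q]}p", None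
def pvTierScan (d : PySem.Dict String String) :
    List String → Option String × Option String × Option String
  | [] => (none, none, none)
  | q :: rest =>
    match d.get? q with
    | some v => (some v, some (PySem.Int.toStr (pvQualityMapB.getD q 0) ++ "p"), none)
    | none => pvTierScan d rest

def get_highest_quality_alt (video_links : List (String × String)) :
    Option String × Option String × Option String :=
  pvTierScan (PySem.Dict.ofList video_links) ["FHD", "HD", "SD"]

-- ===== PRECONDITION & SPEC =====
def Spec_get_highest_quality (video_links : List (String × String)) (out : Option String × Option String × Option String) : Prop := out = get_highest_quality_alt video_links
instance (video_links : List (String × String)) (out : Option String × Option String × Option String) : Decidable (Spec_get_highest_quality video_links out) := by unfold Spec_get_highest_quality; infer_instance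

-- ===== CLAIM (what is proved, stated in full; the proofs are below) =====
def Claim_equal_get_highest_quality : Prop := ∀ (video_links : List (String × String)), Dom_get_highest_quality video_links → Spec_get_highest_quality video_links (get_highest_quality video_links)

-- ===== LEMMAS AND PROOFS =====

lemma pvContains_iff (q : String) :
    pvQualityMapA.contains q = true ↔ (q = "SD" ∨ q = "HD" ∨ q = "FHD") := by
  unfold pvQualityMapA
  rw [PySem.Dict.contains_mk]
  simp only [List.any_cons, List.any_nil, Bool.or_eq_true, beq_iff_eq]
  tauto

lemma pvGetD_A_SD : pvQualityMapA.getD "SD" 0 = 480 := by decide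
lemma pvGetD_A_HD : pvQualityMapA.getD "HD" 0 = 720 := by decide
lemma pvGetD_A_FHD : pvQualityMapA.getD "FHD" 0 = 1080 := by decide
lemma pvGetD_B_SD : pvQualityMapB.getD "SD" 0 = 480 := by decide
lemma pvGetD_B_HD : pvQualityMapB.getD "HD" 0 = 720 := by decide
lemma pvGetD_B_FHD : pvQualityMapB.getD "FHD" 0 = 1080 := by decide

-- the comprehension's conditional fold is the plain insert fold over the filtered list
lemma pvFoldl_if_eq_filter (l : List (String × String)) (d : PySem.Dict String String) :
    l.foldl (fun d p => if pvQualityMapA.contains p.1 then d.insert p.1 p.2 else d) d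
      = (l.filter (fun p => pvQualityMapA.contains p.1)).foldl (fun d p => d.insert p.1 p.2) d := by
  induction l generalizing d with
  | nil => rfl
  | cons p t ih =>
    simp only [List.foldl_cons, List.filter_cons]
    by_cases hc : pvQualityMapA.contains p.1 = true
    · rw [if_pos hc, if_pos hc, List.foldl_cons, ih]
    · rw [if_neg hc, if_neg hc, ih]

-- lookups at a quality key agree between the filtered fold and the full fold
lemma pvGet?_filter_fold (l : List (String × String)) (d d' : PySem.Dict String String)
    (q : String) (hq : pvQualityMapA.contains q = true) (h : d.get? q = d'.get? q) :
    ((l.filter (fun p => pvQualityMapA.contains p.1)).foldl (fun d p => d.insert p.1 p.2) d).get? q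
      = (l.foldl (fun d p => d.insert p.1 p.2) d').get? q := by
  induction l generalizing d d' with
  | nil => exact h
  | cons p t ih =>
    simp only [List.filter_cons, List.foldl_cons]
    by_cases hc : pvQualityMapA.contains p.1 = true
    · rw [if_pos hc, List.foldl_cons]
      apply ih
      rw [PySem.Dict.get?_insert, PySem.Dict.get?_insert, h]
    · rw [if_neg hc]
      apply ih
      rw [PySem.Dict.get?_insert_of_ne]
      · exact h
      · intro e; exact hc (e ▸ hq)

lemma pvKeys_insert_fold (l : List (String × String)) :
    (l.foldl (fun d p => d.insert p.1 p.2) (PySem.Dict.empty (κ := String) (ν := String))).keys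
      = PySem.Set.ofList (l.map (fun p => p.1)) := by
  rw [PySem.Dict.keys_foldl_insert_key l (fun p => p.1) (fun _ p => p.2)]
  rw [PySem.Dict.keys_empty, PySem.Set.update_nil_left]

lemma pvMem_filter_keys (l : List (String × String)) (q : String)
    (hq : pvQualityMapA.contains q = true) :
    q ∈ (l.filter (fun p => pvQualityMapA.contains p.1)).map (fun p => p.1) ↔
      q ∈ l.map (fun p => p.1) := by
  simp only [List.mem_map, List.mem_filter]
  constructor
  · rintro ⟨p, ⟨hp, _⟩, rfl⟩; exact ⟨p, hp, rfl⟩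
  · rintro ⟨p, hp, rfl⟩; exact ⟨p, ⟨hp, hq⟩, rfl⟩

-- ===== VERDICT (by name: the statement is the Claim_ definition above) =====
theorem get_highest_quality_spec : Claim_equal_get_highest_quality := by
  intro l _
  unfold Spec_get_highest_quality get_highest_quality get_highest_quality_alt
  rw [pvFoldl_if_eq_filter]
  set f := l.filter (fun p => pvQualityMapA.contains p.1) with hf
  set F := f.foldl (fun d p => d.insert p.1 p.2) (PySem.Dict.empty (κ := String) (ν := String)) with hF
  set D := PySem.Dict.ofList l with hD
  have hDfold : D = l.foldl (fun d p => d.insert p.1 p.2) PySem.Dict.empty := rfl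
  have keysF : F.keys = PySem.Set.ofList (f.map (fun p => p.1)) := pvKeys_insert_fold f
  have keysD : D.keys = PySem.Set.ofList (l.map (fun p => p.1)) := by
    rw [hDfold]; exact pvKeys_insert_fold l
  have memFD : ∀ q : String, pvQualityMapA.contains q = true → (q ∈ F.keys ↔ q ∈ D.keys) := by
    intro q hq
    rw [keysF, keysD, PySem.Set.mem_ofList, PySem.Set.mem_ofList]
    exact pvMem_filter_keys l q hq
  have getFD : ∀ q : String, pvQualityMapA.contains q = true → F.get? q = D.get? q := by
    intro q hq
    rw [hF, hDfold]
    exact pvGet?_filter_fold l _ _ q hq rfl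
  by_cases hemp : F.items.isEmpty = true
  · -- empty filtered dict: no quality key is present in l, all three lookups fail
    rw [if_pos hemp]
    have hkeys : F.keys = [] := by
      have : F.items = [] := by simpa [List.isEmpty_iff] using hemp
      simp [PySem.Dict.keys, this]
    have hnone : ∀ q : String, pvQualityMapA.contains q = true → D.get? q = none := by
      intro q hq
      rw [PySem.Dict.get?_eq_none_iff_not_mem_keys]
      intro hmem
      have := (memFD q hq).mpr hmem
      simp [hkeys] at this
    simp only [pvTierScan, hnone "FHD" (by decide), hnone "HD" (by decide),
      hnone "SD" (by decide)]
  · rw [if_neg hemp]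
    have hkeysne : F.keys ≠ [] := by
      intro h
      apply hemp
      have : F.items = [] := by
        have := congrArg List.length h
        simpa [PySem.Dict.keys] using this
      simp [this]
    obtain ⟨m, hm⟩ : ∃ m, PySem.List.max? F.keys (fun q => pvQualityMapA.getD q 0) = some m := by
      cases hmx : PySem.List.max? F.keys (fun q => pvQualityMapA.getD q 0) with
      | none => exact absurd ((PySem.List.max?_eq_none_iff _ _).mp hmx) hkeysne
      | some m => exact ⟨m, rfl⟩
    rw [hm]
    have hmmem : m ∈ F.keys := PySem.List.max?_mem hm
    have hmq : pvQualityMapA.contains m = true := by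
      have : m ∈ f.map (fun p => p.1) := by
        rw [keysF, PySem.Set.mem_ofList] at hmmem; exact hmmem
    -- every key of the filtered dict passes the quality filter
      obtain ⟨p, hp, rfl⟩ := List.mem_map.mp this
      exact (List.mem_filter.mp hp).2
    have hmax : ∀ y ∈ F.keys, pvQualityMapA.getD y 0 ≤ pvQualityMapA.getD m 0 :=
      PySem.List.max?_isMax hm
    have hget : ∀ q : String, q ∈ F.keys → ∃ v, D.get? q = some v := by
      intro q hq'
      have hc : pvQualityMapA.contains q = true := by
        have : q ∈ f.map (fun p => p.1) := by
          rw [keysF, PySem.Set.mem_ofList] at hq'; exact hq'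
        obtain ⟨p, hp, rfl⟩ := List.mem_map.mp this
        exact (List.mem_filter.mp hp).2
      have : q ∈ D.keys := (memFD q hc).mp hq'
      cases hdq : D.get? q with
      | none => exact absurd ((PySem.Dict.get?_eq_none_iff_not_mem_keys _ _).mp hdq) (by simpa)
      | some v => exact ⟨v, rfl⟩
    have hnot : ∀ q : String, pvQualityMapA.contains q = true → q ∉ F.keys → D.get? q = none := by
      intro q hc hq'
      rw [PySem.Dict.get?_eq_none_iff_not_mem_keys]
      intro hmem
      exact hq' ((memFD q hc).mpr hmem)
    rcases (pvContains_iff m).mp hmq with rfl | rfl | rfl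
    · -- m = "SD": neither "FHD" nor "HD" can be a key
      have hF1 : "FHD" ∉ F.keys := by
        intro h; have := hmax "FHD" h
        rw [pvGetD_A_FHD, pvGetD_A_SD] at this; omega
      have hH1 : "HD" ∉ F.keys := by
        intro h; have := hmax "HD" h
        rw [pvGetD_A_HD, pvGetD_A_SD] at this; omega
      obtain ⟨v, hv⟩ := hget "SD" hmmem
      simp only [pvTierScan, hnot "FHD" (by decide) hF1, hnot "HD" (by decide) hH1, hv]
      rw [getFD "SD" (by decide), hv, pvGetD_A_SD, pvGetD_B_SD]
    · -- m = "HD": "FHD" cannot be a key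
      have hF1 : "FHD" ∉ F.keys := by
        intro h; have := hmax "FHD" h
        rw [pvGetD_A_FHD, pvGetD_A_HD] at this; omega
      obtain ⟨v, hv⟩ := hget "HD" hmmem
      simp only [pvTierScan, hnot "FHD" (by decide) hF1, hv]
      rw [getFD "HD" (by decide), hv, pvGetD_A_HD, pvGetD_B_HD]
    · -- m = "FHD"
      obtain ⟨v, hv⟩ := hget "FHD" hmmem
      simp only [pvTierScan, hv]
      rw [getFD "FHD" (by decide), hv, pvGetD_A_FHD, pvGetD_B_FHD]
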